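-- pv_equiv track=rewrite | github.com/piskunovma/logic_python | lesson5/task_2.py | sum_func16
-- ===== SOURCE A (Python) =====
-- from collections import deque
--
-- def sum_func16(digit1, digit2):
--     dict_num = {'0': 0, '1': 1, '2': 2, '3': 3, '4': 4,
--                 '5': 5, '6': 6, '7': 7, '8': 8, '9': 9,
--                 'A': 10, 'B': 11, 'C': 12, 'D': 13,
--                 'E': 14, 'F': 15}
--
--     list_num = []
--     for key, _ in dict_num.items():
--         list_num.append(key)
--
--     result = deque()
--     discharge = 0
--
--     if len(digit2) > len(digit1):
--         digit1, digit2 = digit2, digit1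
--
--     while digit1:
--         if digit2:
--             number_res = dict_num[digit1.pop()] + dict_num[digit2.pop()] + discharge
--         else:
--             number_res = dict_num[digit1.pop()] + discharge
--
--         if number_res < 16:
--             discharge = 0
--         else:
--             discharge = 1
--             number_res -= 16
--
--         result.appendleft(list_num[number_res])
--
--     if discharge == 1:
--         result.appendleft('1')
--
--     return list(result)
-- ===== SOURCE B (Python) =====
-- def sum_func16(digit1, digit2):
--     dict_num = {'0': 0, '1': 1, '2': 2, '3': 3, '4': 4,
--                 '5': 5, '6': 6, '7': 7, '8': 8, '9': 9,
--                 'A': 10, 'B': 11, 'C': 12, 'D': 13,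
--                 'E': 14, 'F': 15}
--     width = max(len(digit1), len(digit2))
--     if width == 0:
--         return []
--     total = 0
--     for d in digit1:
--         total = total * 16 + dict_num[d]
--     n2 = 0
--     for d in digit2:
--         n2 = n2 * 16 + dict_num[d]
--     total += n2
--     return list(format(total, 'X').rjust(width, '0'))
-- ===== Notes on version B (the rewrite author's own statement) =====
-- stated objective: idiomatic
-- what changed: B replaces A's digit-by-digit school addition with carry (popping from the ends of both lists) by converting each list to an integer with a Horner fold, adding once, and formatting the sum back to hex left-padded to max(len1,len2); B does not mutate its arguments while A empties both input lists (the equivalence is about the return value).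
import Mathlib
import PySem

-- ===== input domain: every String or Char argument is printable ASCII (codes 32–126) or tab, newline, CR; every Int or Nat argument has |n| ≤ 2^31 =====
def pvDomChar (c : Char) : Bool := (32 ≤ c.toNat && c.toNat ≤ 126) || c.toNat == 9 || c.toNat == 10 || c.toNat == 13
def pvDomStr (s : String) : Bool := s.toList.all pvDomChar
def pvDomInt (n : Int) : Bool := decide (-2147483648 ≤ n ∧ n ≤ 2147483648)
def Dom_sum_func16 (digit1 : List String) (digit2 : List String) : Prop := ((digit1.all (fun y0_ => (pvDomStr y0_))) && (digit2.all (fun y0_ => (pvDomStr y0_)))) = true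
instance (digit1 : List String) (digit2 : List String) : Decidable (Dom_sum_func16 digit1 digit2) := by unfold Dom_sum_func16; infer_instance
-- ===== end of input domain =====

-- B converts each list to an integer (Horner fold), adds once, and formats the sum back to hex
-- padded to max(len1,len2), instead of A's digit-by-digit addition with an explicit carry.
-- A empties both argument lists by popping; B does not mutate them — the claim is about the return value.

-- ===== PORT A =====
-- the dict of both Pythons: {'0':0, …, 'F':15}
def dictNum : PySem.Dict String Int :=
  PySem.Dict.ofList [("0",0),("1",1),("2",2),("3",3),("4",4),("5",5),("6",6),("7",7),
                     ("8",8),("9",9),("A",10),("B",11),("C",12),("D",13),("E",14),("F",15)]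

-- dict_num[s]; Pre_ guarantees the key is present (Python raises KeyError otherwise)
def hv (s : String) : Int := (dictNum.get? s).getD 0

-- list_num built by the for-loop over dict_num.items()
def listNum : List String := dictNum.items.foldl (fun acc kv => acc ++ [kv.1]) []

-- the while-loop of A; digit1/digit2 are passed REVERSED so that .pop() (pop from the end)
-- becomes structural recursion on the head
def loopA : List String → List String → Int → List String → List String
  | [], _, dis, res => if dis = 1 then "1" :: res else res
  | d :: ds, es, dis, res =>
    let n : Int := match es with
      | [] => hv d + dis
      | e :: _ => hv d + hv e + dis
    if n < 16 then loopA ds es.tail 0 (PySem.List.pyGetD listNum n "0" :: res)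
    else loopA ds es.tail 1 (PySem.List.pyGetD listNum (n - 16) "0" :: res)

def sum_func16 (digit1 : List String) (digit2 : List String) : List String :=
  if digit2.length > digit1.length then loopA digit2.reverse digit1.reverse 0 []
  else loopA digit1.reverse digit2.reverse 0 []

-- ===== PORT B =====
-- digit table of format(·, 'X')
def hexStr (k : Nat) : String :=
  ["0","1","2","3","4","5","6","7","8","9","A","B","C","D","E","F"].getD k ""

-- format(n, 'X') for n > 0: build the digit list most-significant first
def hexLoop (n : Nat) (acc : List String) : List String :=
  if h : n = 0 then acc else hexLoop (n / 16) (hexStr (n % 16) :: acc)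
  termination_by n
  decreasing_by exact Nat.div_lt_self (Nat.pos_of_ne_zero h) (by omega)

-- format(n, 'X')
def hexRep (n : Nat) : List String := if n = 0 then ["0"] else hexLoop n []

-- the Horner fold 'for d in ds: total = total*16 + dict_num[d]'
def toInt (ds : List String) : Int := ds.foldl (fun a d => a * 16 + hv d) 0

def sum_func16_alt (digit1 : List String) (digit2 : List String) : List String :=
  let w := max digit1.length digit2.length
  if w = 0 then []
  else
    let total := toInt digit1 + toInt digit2
    let s := hexRep total.toNat
    List.replicate (w - s.length) "0" ++ s

-- ===== PRECONDITION & SPEC =====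
def hexKeys : List String :=
  ["0","1","2","3","4","5","6","7","8","9","A","B","C","D","E","F"]

-- Pre_ excludes exactly the inputs on which Python A raises KeyError: some element is not
-- one of the sixteen single-character upper-case hex digit strings.
def Pre_sum_func16 (digit1 : List String) (digit2 : List String) : Prop :=
  (∀ s ∈ digit1, s ∈ hexKeys) ∧ (∀ s ∈ digit2, s ∈ hexKeys)

instance (digit1 : List String) (digit2 : List String) : Decidable (Pre_sum_func16 digit1 digit2) := by
  unfold Pre_sum_func16; infer_instance

def pvWitness_sum_func16 : List String × List String := (["1", "A"], ["F"])

def Spec_sum_func16 (digit1 : List String) (digit2 : List String) (out : List String) : Prop := out = sum_func16_alt digit1 digit2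
instance (digit1 : List String) (digit2 : List String) (out : List String) : Decidable (Spec_sum_func16 digit1 digit2 out) := by unfold Spec_sum_func16; infer_instance

-- ===== CLAIM (what is proved, stated in full; the proofs are below) =====
def Claim_equal_sum_func16 : Prop := ∀ (digit1 : List String) (digit2 : List String), Dom_sum_func16 digit1 digit2 → Pre_sum_func16 digit1 digit2 → Spec_sum_func16 digit1 digit2 (sum_func16 digit1 digit2)

-- ===== LEMMAS AND PROOFS =====

-- numeric value of one hex digit, as a Nat
def nv (s : String) : Nat := (hv s).toNat

-- value of a least-significant-first digit list
def valL : List String → Nat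
  | [] => 0
  | d :: ds => nv d + 16 * valL ds

-- number of hex digits of n (0 for n = 0)
def hexLen (n : Nat) : Nat :=
  if h : n = 0 then 0 else hexLen (n / 16) + 1
  termination_by n
  decreasing_by exact Nat.div_lt_self (Nat.pos_of_ne_zero h) (by omega)

-- A's loop written as a pure function of the total value and the width
def fixed : Nat → Nat → List String → List String
  | 0, n, acc => if n = 1 then "1" :: acc else acc
  | L + 1, n, acc => fixed L (n / 16) (hexStr (n % 16) :: acc)

theorem hv_of_mem {s : String} (h : s ∈ hexKeys) : hv s = (nv s : Int) ∧ nv s < 16 := by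
  fin_cases h <;> decide

theorem listNum_digit : ∀ k : Nat, k < 16 → PySem.List.pyGetD listNum (k : Int) "0" = hexStr k := by
  decide

theorem valL_lt {xs : List String} (h : ∀ s ∈ xs, s ∈ hexKeys) : valL xs < 16 ^ xs.length := by
  induction xs with
  | nil => simp [valL]
  | cons d ds ih =>
    have hd := (hv_of_mem (h d (by simp))).2
    have hds := ih (fun s hs => h s (by simp [hs]))
    simp only [valL, List.length_cons, pow_succ]
    omega

theorem valL_append_singleton (xs : List String) (d : String) :
    valL (xs ++ [d]) = valL xs + nv d * 16 ^ xs.length := by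
  induction xs with
  | nil => simp [valL]
  | cons x xs ih =>
    simp only [List.cons_append, valL, ih, List.length_cons, pow_succ]
    ring

theorem toInt_eq_valL {xs : List String} (h : ∀ s ∈ xs, s ∈ hexKeys) :
    toInt xs = (valL xs.reverse : Int) := by
  suffices H : ∀ (ys : List String) (a : Int), (∀ s ∈ ys, s ∈ hexKeys) →
      ys.foldl (fun a d => a * 16 + hv d) a = a * 16 ^ ys.length + (valL ys.reverse : Int) by
    have := H xs 0 h
    simpa [toInt] using this
  intro ys
  induction ys with
  | nil => intro a _; simp [valL]
  | cons d ds ih =>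
    intro a hmem
    have hd := (hv_of_mem (hmem d (by simp))).1
    simp only [List.foldl_cons, List.reverse_cons, List.length_cons]
    rw [ih _ (fun s hs => hmem s (by simp [hs])), valL_append_singleton, hd]
    have hlen : ds.reverse.length = ds.length := by simp
    rw [hlen]
    push_cast
    ring

theorem loopA_eq : ∀ (rds res acc : List String) (c : Nat),
    (∀ s ∈ rds, s ∈ hexKeys) → (∀ s ∈ res, s ∈ hexKeys) →
    res.length ≤ rds.length → c ≤ 1 →
    loopA rds res (c : Int) acc = fixed rds.length (valL rds + valL res + c) acc := by
  intro rds
  induction rds with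
  | nil =>
    intro res acc c _ _ hlen hc
    have : res = [] := List.eq_nil_of_length_eq_zero (by simpa using hlen)
    subst this
    interval_cases c <;> simp [loopA, fixed, valL]
  | cons d ds ih =>
    intro res acc c hrds hres hlen hc
    have hd := hv_of_mem (hrds d (by simp))
    have hds : ∀ s ∈ ds, s ∈ hexKeys := fun s hs => hrds s (by simp [hs])
    cases res with
    | nil =>
      -- m = nv d + c
      have hm : nv d + c ≤ 16 := by omega
      simp only [loopA, hd.1]
      by_cases hlt : (nv d : Int) + (c : Int) < 16
      · have hmlt : nv d + c < 16 := by exact_mod_cast (by push_cast at hlt ⊢; omega : ((nv d + c : Nat) : Int) < 16)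
        rw [if_pos (by omega)]
        have hcast : (nv d : Int) + (c : Int) = ((nv d + c : Nat) : Int) := by push_cast; ring
        rw [hcast, listNum_digit _ hmlt]
        have := ih [] (hexStr (nv d + c) :: acc) 0 hds (by simp) (by simp) (by omega)
        simp only [List.tail_nil, valL, Nat.add_zero] at this ⊢
        rw [show ((0:Nat):Int) = (0:Int) by rfl] at this
        rw [this]
        simp only [List.length_cons, fixed]
        congr 2
        · omega
        · congr 1; omega
      · have hmeq : nv d + c = 16 := by
          have : ¬ ((nv d : Int) + (c : Int) < 16) := hlt
          push_cast at this; omega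
        rw [if_neg (by omega)]
        have hcast : (nv d : Int) + (c : Int) - 16 = ((0 : Nat) : Int) := by push_cast; omega
        rw [hcast, listNum_digit 0 (by omega)]
        have := ih [] (hexStr 0 :: acc) 1 hds (by simp) (by simp) (by omega)
        simp only [List.tail_nil, valL, Nat.add_zero] at this ⊢
        rw [show ((1:Nat):Int) = (1:Int) by rfl] at this
        rw [this]
        simp only [List.length_cons, fixed]
        congr 2
        · omega
        · congr 1; omega
    | cons e es =>
      have he := hv_of_mem (hres e (by simp))
      have hes : ∀ s ∈ es, s ∈ hexKeys := fun s hs => hres s (by simp [hs])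
      have hlen' : es.length ≤ ds.length := by simpa using hlen
      simp only [loopA, hd.1, he.1, List.tail_cons]
      by_cases hlt : (nv d : Int) + (nv e : Int) + (c : Int) < 16
      · have hmlt : nv d + nv e + c < 16 := by push_cast at hlt; omega
        rw [if_pos (by omega)]
        have hcast : (nv d : Int) + (nv e : Int) + (c : Int) = ((nv d + nv e + c : Nat) : Int) := by
          push_cast; ring
        rw [hcast, listNum_digit _ hmlt]
        have := ih es (hexStr (nv d + nv e + c) :: acc) 0 hds hes hlen' (by omega)
        rw [show ((0:Nat):Int) = (0:Int) by rfl] at this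
        rw [this]
        simp only [List.length_cons, fixed, valL]
        congr 2
        · omega
        · congr 1; omega
      · have hmge : 16 ≤ nv d + nv e + c := by push_cast at hlt; omega
        have hmlt : nv d + nv e + c - 16 < 16 := by omega
        rw [if_neg (by omega)]
        have hcast : (nv d : Int) + (nv e : Int) + (c : Int) - 16 = ((nv d + nv e + c - 16 : Nat) : Int) := by
          push_cast [hmge]; omega
        rw [hcast, listNum_digit _ hmlt]
        have := ih es (hexStr (nv d + nv e + c - 16) :: acc) 1 hds hes hlen' (by omega)
        rw [show ((1:Nat):Int) = (1:Int) by rfl] at this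
        rw [this]
        simp only [List.length_cons, fixed, valL]
        congr 2
        · omega
        · congr 1; omega

theorem hexLoop_len : ∀ n acc, (hexLoop n acc).length = hexLen n + acc.length := by
  intro n
  induction n using Nat.strong_induction_on with
  | _ n ih =>
    intro acc
    by_cases h : n = 0
    · subst h; simp [hexLoop, hexLen]
    · rw [hexLoop, dif_neg h, hexLen, dif_neg h,
        ih (n / 16) (Nat.div_lt_self (Nat.pos_of_ne_zero h) (by omega))]
      simp; omega

theorem fixed_zero : ∀ L acc, fixed L 0 acc = List.replicate L "0" ++ acc := by
  intro L
  induction L with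
  | zero => intro acc; simp [fixed]
  | succ L ih =>
    intro acc
    simp only [fixed, Nat.zero_div, Nat.zero_mod]
    rw [ih, List.replicate_succ' (n := L)]
    simp [hexStr]

theorem fixed_eq_pad : ∀ L n acc, 0 < n → n < 2 * 16 ^ L →
    fixed L n acc = List.replicate (L - hexLen n) "0" ++ hexLoop n acc := by
  intro L
  induction L with
  | zero =>
    intro n acc hpos hlt
    have : n = 1 := by omega
    subst this
    rw [hexLoop, dif_neg (by omega)]
    simp [fixed, hexLen, hexLoop, hexStr]
  | succ L ih =>
    intro n acc hpos hlt
    by_cases h16 : n < 16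
    · have hdiv : n / 16 = 0 := Nat.div_eq_of_lt h16
      have hmod : n % 16 = n := Nat.mod_eq_of_lt h16
      rw [fixed, hdiv, hmod, fixed_zero]
      rw [hexLoop, dif_neg (by omega), hdiv, hmod]
      rw [hexLoop, dif_pos rfl]
      rw [hexLen, dif_neg (by omega), hdiv, hexLen, dif_pos rfl]
      rfl
    · have hdpos : 0 < n / 16 := Nat.div_pos (by omega) (by omega)
      have hdlt : n / 16 < 2 * 16 ^ L := by
        have : n / 16 < (2 * 16 ^ (L + 1)) / 16 + 1 := by
          have := Nat.div_le_div_right (c := 16) (Nat.le_of_lt hlt)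
          omega
        have h2 : (2 * 16 ^ (L + 1)) / 16 = 2 * 16 ^ L := by
          rw [pow_succ]
          omega
        omega
      have hLoop : hexLoop n acc = hexLoop (n / 16) (hexStr (n % 16) :: acc) := by
        conv_lhs => rw [hexLoop]
        rw [dif_neg (by omega)]
      have hLen : hexLen n = hexLen (n / 16) + 1 := by
        conv_lhs => rw [hexLen]
        rw [dif_neg (by omega)]
      rw [fixed, ih (n / 16) (hexStr (n % 16) :: acc) hdpos hdlt, hLoop, hLen]
      congr 2
      omega

theorem replicate_zero_split (L : Nat) (hL : 0 < L) :
    List.replicate L "0" = List.replicate (L - 1) "0" ++ ["0"] := by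
  conv_lhs => rw [show L = (L - 1) + 1 by omega]
  rw [List.replicate_succ']

-- the common case: x is the (weakly) longer list and it is nonempty
theorem main_case (x y : List String)
    (hx : ∀ s ∈ x, s ∈ hexKeys) (hy : ∀ s ∈ y, s ∈ hexKeys)
    (hlen : y.length ≤ x.length) (hpos : 0 < x.length) :
    loopA x.reverse y.reverse 0 [] =
      List.replicate (x.length - (hexRep (toInt x + toInt y).toNat).length) "0" ++
        hexRep (toInt x + toInt y).toNat := by
  have hxr : ∀ s ∈ x.reverse, s ∈ hexKeys := by simpa using hx
  have hyr : ∀ s ∈ y.reverse, s ∈ hexKeys := by simpa using hy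
  have hlenr : y.reverse.length ≤ x.reverse.length := by simpa using hlen
  have hA := loopA_eq x.reverse y.reverse [] 0 hxr hyr hlenr (by omega)
  rw [show ((0:Nat):Int) = (0:Int) by rfl] at hA
  set N : Nat := valL x.reverse + valL y.reverse with hN
  have htot : (toInt x + toInt y).toNat = N := by
    rw [toInt_eq_valL hx, toInt_eq_valL hy]
    omega
  have hxlt := valL_lt hxr
  have hylt := valL_lt hyr
  rw [List.length_reverse] at hxlt hylt
  have hybound : valL y.reverse < 16 ^ x.length :=
    lt_of_lt_of_le hylt (Nat.pow_le_pow_right (by omega) hlen)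
  have hNlt : N < 2 * 16 ^ x.length := by omega
  rw [htot, hA]
  simp only [List.length_reverse, Nat.add_zero]
  by_cases hN0 : N = 0
  · rw [hN0, fixed_zero]
    simp only [List.append_nil]
    rw [show hexRep 0 = ["0"] from rfl]
    rw [replicate_zero_split x.length hpos]
    simp
  · rw [fixed_eq_pad x.length N [] (by omega) hNlt]
    have hrep : hexRep N = hexLoop N [] := by rw [hexRep, if_neg hN0]
    rw [hrep]
    congr 2
    rw [hexLoop_len]
    simp

-- ===== VERDICT (by name: the statement is the Claim_ definition above) =====
theorem sum_func16_spec : Claim_equal_sum_func16 := by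
  intro d1 d2 _ hpre
  obtain ⟨h1, h2⟩ := hpre
  unfold Spec_sum_func16 sum_func16 sum_func16_alt
  by_cases hgt : d2.length > d1.length
  · rw [if_pos hgt]
    have := main_case d2 d1 h2 h1 (by omega) (by omega)
    rw [this]
    rw [if_neg (by omega)]
    have hmax : max d1.length d2.length = d2.length := by omega
    rw [hmax, add_comm (toInt d1) (toInt d2)]
  · rw [if_neg hgt]
    have hmax : max d1.length d2.length = d1.length := by omega
    by_cases h0 : d1.length = 0
    · have hd1 : d1 = [] := List.eq_nil_of_length_eq_zero h0
      have hd2 : d2 = [] := List.eq_nil_of_length_eq_zero (by omega)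
      subst hd1; subst hd2
      simp [loopA]
    · rw [main_case d1 d2 h1 h2 (by omega) (by omega)]
      rw [if_neg (by omega), hmax]
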